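-- pv_equiv track=rewrite | github.com/lollo89/take-home-test-python | app/statement_parser.py | extract_sign
-- ===== SOURCE A (Python) =====
-- def extract_sign(condition):
--     match (condition[0]):
--         case "is":
--             return "" + extract_sign(condition[1::])
--         case "not":
--             return "n" + extract_sign(condition[1::])
--         case _:
--             return extract_operator(condition)
--
-- def extract_operator(condition):
--     length = len(condition)
--     match(condition[0]):
--         case "above" | "greater":
--             return "gt" + extract_operator(condition[1::]) if length > 1 else "gt"
--         case "below" | "less":
--             return "lt" + extract_operator(condition[1::]) if length > 1 else "lt"
--         case "equals":
--             return "e"  + extract_operator(condition[1::]) if length > 1 else "e"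
--         case _:
--             return extract_operator(condition[1::]) if length > 1 else ""
-- ===== SOURCE B (Python) =====
-- OPS = {"above": "gt", "greater": "gt", "below": "lt", "less": "lt", "equals": "e"}
--
-- def extract_sign(condition):
--     n = len(condition)
--     i = 0
--     while i < n and condition[i] in ("is", "not"):
--         i += 1
--     return "n" * condition[:i].count("not") + "".join(
--         OPS.get(t, "") for t in condition[i:]
--     )
-- ===== Notes on version B (the rewrite author's own statement) =====
-- stated objective: faster
-- what changed: Replaces A's double recursion with O(n^2) list slicing and repeated string concatenation by a single linear pass: skip the leading is/not run by index, then one join over a constant lookup table.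
import Mathlib
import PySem

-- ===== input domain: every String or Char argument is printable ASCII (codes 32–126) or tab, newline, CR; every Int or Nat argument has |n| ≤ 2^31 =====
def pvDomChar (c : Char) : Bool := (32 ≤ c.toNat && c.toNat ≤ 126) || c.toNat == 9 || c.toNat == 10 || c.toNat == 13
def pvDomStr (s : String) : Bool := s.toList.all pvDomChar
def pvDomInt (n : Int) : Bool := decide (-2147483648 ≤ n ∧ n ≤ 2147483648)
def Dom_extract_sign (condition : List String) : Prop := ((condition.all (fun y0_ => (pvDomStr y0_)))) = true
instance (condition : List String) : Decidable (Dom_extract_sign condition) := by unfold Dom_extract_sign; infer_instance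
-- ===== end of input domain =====

-- B is a single linear pass (index skip + one join) replacing A's recursion over slices; return value only, no side effects.

-- ===== PORT A =====
-- Python's extract_operator(condition): condition[1::] is the tail; 'length > 1' is 'rest ≠ []'.
-- On [] the Python raises IndexError (condition[0]); that input is excluded by Pre_, the port returns "" there.
def extract_operatorA : List String → String
  | [] => ""            -- Python raises IndexError here; outside Pre_
  | c :: rest =>
    if c = "above" ∨ c = "greater" then
      (if rest ≠ [] then "gt" ++ extract_operatorA rest else "gt")
    else if c = "below" ∨ c = "less" then
      (if rest ≠ [] then "lt" ++ extract_operatorA rest else "lt")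
    else if c = "equals" then
      (if rest ≠ [] then "e" ++ extract_operatorA rest else "e")
    else
      (if rest ≠ [] then extract_operatorA rest else "")

def extract_sign : List String → String
  | [] => ""            -- Python raises IndexError here; outside Pre_
  | c :: rest =>
    if c = "is" then "" ++ extract_sign rest
    else if c = "not" then "n" ++ extract_sign rest
    else extract_operatorA (c :: rest)

-- ===== PORT B =====
-- Source B's OPS.get(t, "") lookup
def opsGet (t : String) : String :=
  if t = "above" then "gt"
  else if t = "greater" then "gt"
  else if t = "below" then "lt"
  else if t = "less" then "lt"
  else if t = "equals" then "e"
  else ""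

-- Source B's while-loop advances i past the leading run of "is"/"not": condition[:i] is the
-- takeWhile of that run, condition[i:] the dropWhile.
def extract_sign_alt (condition : List String) : String :=
  let pre := condition.takeWhile (fun t => t = "is" || t = "not")
  let rest := condition.dropWhile (fun t => t = "is" || t = "not")
  String.join (List.replicate (pre.count "not") "n") ++ String.join (rest.map opsGet)

-- ===== PRECONDITION & SPEC =====
-- Pre_ excludes exactly the inputs on which the Python A raises IndexError: lists whose
-- every token is "is" or "not" (including []), where the sign recursion reaches condition = [].
def Pre_extract_sign (condition : List String) : Prop :=
  ∃ t ∈ condition, t ≠ "is" ∧ t ≠ "not"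
instance (condition : List String) : Decidable (Pre_extract_sign condition) := by
  unfold Pre_extract_sign; infer_instance

def pvWitness_extract_sign : List String := ["not", "above"]

def Spec_extract_sign (condition : List String) (out : String) : Prop := out = extract_sign_alt condition
instance (condition : List String) (out : String) : Decidable (Spec_extract_sign condition out) := by unfold Spec_extract_sign; infer_instance

-- ===== CLAIM (what is proved, stated in full; the proofs are below) =====
def Claim_equal_extract_sign : Prop := ∀ (condition : List String), Dom_extract_sign condition → Pre_extract_sign condition → Spec_extract_sign condition (extract_sign condition)

-- ===== LEMMAS AND PROOFS =====

lemma foldl_str_append (l : List String) : ∀ init : String,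
    List.foldl (fun r s => r ++ s) init l = init ++ List.foldl (fun r s => r ++ s) "" l := by
  induction l with
  | nil => intro init; simp
  | cons a t ih =>
    intro init
    simp only [List.foldl]
    rw [ih (init ++ a), ih ("" ++ a), String.append_assoc]
    simp

lemma join_cons (s : String) (l : List String) :
    String.join (s :: l) = s ++ String.join l := by
  simp only [String.join, List.foldl]
  rw [foldl_str_append l ("" ++ s)]
  simp

lemma operatorA_eq_join (l : List String) :
    extract_operatorA l = String.join (l.map opsGet) := by
  induction l with
  | nil => rfl
  | cons c rest ih =>
    rw [List.map_cons, join_cons]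
    simp only [extract_operatorA]
    by_cases h1 : c = "above" ∨ c = "greater"
    · have hc : opsGet c = "gt" := by rcases h1 with h | h <;> simp [opsGet, h]
      rw [if_pos h1, hc]
      cases rest with
      | nil => simp [String.join]
      | cons a t => simp [ih]
    · by_cases h2 : c = "below" ∨ c = "less"
      · have hc : opsGet c = "lt" := by
          rcases h2 with h | h <;> subst h <;> simp [opsGet]
        rw [if_neg h1, if_pos h2, hc]
        cases rest with
        | nil => simp [String.join]
        | cons a t => simp [ih]
      · by_cases h3 : c = "equals"
        · have hc : opsGet c = "e" := by
            subst h3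
            unfold opsGet
            rw [if_neg (fun h => h1 (Or.inl h)), if_neg (fun h => h1 (Or.inr h)),
                if_neg (fun h => h2 (Or.inl h)), if_neg (fun h => h2 (Or.inr h)), if_pos rfl]
          rw [if_neg h1, if_neg h2, if_pos h3, hc]
          cases rest with
          | nil => simp [String.join]
          | cons a t => simp [ih]
        · have hc : opsGet c = "" := by
            unfold opsGet
            rw [if_neg (fun h => h1 (Or.inl h)), if_neg (fun h => h1 (Or.inr h)),
                if_neg (fun h => h2 (Or.inl h)), if_neg (fun h => h2 (Or.inr h)), if_neg h3]
          rw [if_neg h1, if_neg h2, if_neg h3, hc]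
          cases rest with
          | nil => simp [String.join]
          | cons a t => simp [ih]

lemma alt_cons_is (rest : List String) :
    extract_sign_alt ("is" :: rest) = extract_sign_alt rest := by
  simp [extract_sign_alt, List.takeWhile, List.dropWhile]

lemma alt_cons_not (rest : List String) :
    extract_sign_alt ("not" :: rest) = "n" ++ extract_sign_alt rest := by
  simp [extract_sign_alt, List.takeWhile, List.dropWhile, List.replicate_succ, join_cons, String.append_assoc]

lemma alt_cons_other (c : String) (rest : List String) (h1 : c ≠ "is") (h2 : c ≠ "not") :
    extract_sign_alt (c :: rest) = String.join ((c :: rest).map opsGet) := by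
  simp [extract_sign_alt, List.takeWhile, List.dropWhile, h1, h2, String.join]

theorem extract_sign_eq (condition : List String)
    (hp : Pre_extract_sign condition) :
    extract_sign condition = extract_sign_alt condition := by
  induction condition with
  | nil => exact absurd hp (by simp [Pre_extract_sign])
  | cons c rest ih =>
    by_cases h1 : c = "is"
    · subst h1
      have hp' : Pre_extract_sign rest := by
        obtain ⟨t, ht, hne⟩ := hp
        rcases List.mem_cons.mp ht with h | h
        · exact absurd h hne.1
        · exact ⟨t, h, hne⟩
      simp [extract_sign, alt_cons_is, ih hp']
    · by_cases h2 : c = "not"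
      · subst h2
        have hp' : Pre_extract_sign rest := by
          obtain ⟨t, ht, hne⟩ := hp
          rcases List.mem_cons.mp ht with h | h
          · exact absurd h hne.2
          · exact ⟨t, h, hne⟩
        simp [extract_sign, alt_cons_not, ih hp']
      · simp only [extract_sign, h1, h2, if_false]
        rw [alt_cons_other c rest h1 h2, operatorA_eq_join]

-- ===== VERDICT (by name: the statement is the Claim_ definition above) =====
theorem extract_sign_spec : Claim_equal_extract_sign := by
  intro condition _ hp
  unfold Spec_extract_sign
  exact extract_sign_eq condition hp
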